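-- pv_equiv track=rewrite | github.com/kv3n/foobar | nebula.py | get_num_from_state
-- ===== SOURCE A (Python) =====
-- def get_num_from_state(state):
--     width = len(state[0])
--     height = len(state)
--     state_string = ''
--     for grid_row in range(height):
--         for grid_col in range(width):
--             state_string += str(int(state[grid_row][grid_col]))
--
--     return int(state_string, 2)
-- ===== SOURCE B (Python) =====
-- def get_num_from_state(state):
--     width = len(state[0])
--     num = 0
--     for row in state:
--         row_bits = 0
--         for col in range(width):
--             row_bits = 2 * row_bits + (1 if row[col] else 0)
--         num = num * 2 ** width + row_bits
--     return num
-- ===== Notes on version B (the rewrite author's own statement) =====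
-- stated objective: simpler
-- what changed: Replaces building a '0'/'1' string and re-parsing it with int(s, 2) by direct integer accumulation: each row is folded into an integer and shifted into the running result, so no string is ever built or parsed.
import Mathlib
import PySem

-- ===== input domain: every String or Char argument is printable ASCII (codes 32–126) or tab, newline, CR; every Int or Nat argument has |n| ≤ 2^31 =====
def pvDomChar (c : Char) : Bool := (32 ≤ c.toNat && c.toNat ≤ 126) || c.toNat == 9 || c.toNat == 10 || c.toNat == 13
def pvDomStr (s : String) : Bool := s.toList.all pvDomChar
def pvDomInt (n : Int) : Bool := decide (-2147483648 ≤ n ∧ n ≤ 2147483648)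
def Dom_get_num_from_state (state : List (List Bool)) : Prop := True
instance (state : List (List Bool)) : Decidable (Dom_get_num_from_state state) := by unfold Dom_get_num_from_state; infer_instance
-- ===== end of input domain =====

-- B replaces A's build-a-'0'/'1'-string-then-int(s,2) with direct integer accumulation
-- (per-row value, shifted into the running result); objective: simpler, same cost.


-- ===== PORT A =====
-- hand port of int(s, 2) (the prelude's general base parser keeps its digit machinery
-- private, so it cannot be reasoned about); exact on the strings this program ever passes:
-- strings of '0'/'1' characters only, with none = ValueError on the empty string.
def pyIntBase2? (cs : List Char) : Option Int :=
  match cs with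
  | [] => none
  | _ => some (cs.foldl (fun n c => 2 * n + (if c = '1' then 1 else 0)) 0)

def get_num_from_state (state : List (List Bool)) : Int :=
  let width : Int := PySem.List.len (PySem.List.pyGetD state 0 [])
  let height : Int := PySem.List.len state
  let state_string : List Char :=
    (PySem.List.pyRange 0 height 1).foldl (fun acc grid_row =>
      (PySem.List.pyRange 0 width 1).foldl (fun acc2 grid_col =>
        acc2 ++ PySem.Int.toChars
          (if PySem.List.pyGetD (PySem.List.pyGetD state grid_row []) grid_col false then 1 else 0)) acc) []
  (pyIntBase2? state_string).getD 0

-- ===== PORT B =====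
def get_num_from_state_alt (state : List (List Bool)) : Int :=
  let width : Int := PySem.List.len (PySem.List.pyGetD state 0 [])
  state.foldl (fun num row =>
    let row_bits : Int := (PySem.List.pyRange 0 width 1).foldl
      (fun rb col => 2 * rb + (if PySem.List.pyGetD row col false then 1 else 0)) 0
    num * 2 ^ width.toNat + row_bits) 0

-- ===== PRECONDITION & SPEC =====
-- Pre_ excludes exactly the inputs where A raises: the empty grid (IndexError on state[0]),
-- a grid whose first row is empty (ValueError from int('', 2)), and ragged grids with a row
-- shorter than the first (IndexError).
def Pre_get_num_from_state (state : List (List Bool)) : Prop :=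
  state ≠ [] ∧ state.headI ≠ [] ∧ ∀ row ∈ state, state.headI.length ≤ row.length
instance (state : List (List Bool)) : Decidable (Pre_get_num_from_state state) := by
  unfold Pre_get_num_from_state; infer_instance

def pvWitness_get_num_from_state : List (List Bool) := [[true, false], [false, true]]

def Spec_get_num_from_state (state : List (List Bool)) (out : Int) : Prop := out = get_num_from_state_alt state
instance (state : List (List Bool)) (out : Int) : Decidable (Spec_get_num_from_state state out) := by unfold Spec_get_num_from_state; infer_instance

-- ===== CLAIM (what is proved, stated in full; the proofs are below) =====
def Claim_equal_get_num_from_state : Prop := ∀ (state : List (List Bool)), Dom_get_num_from_state state → Pre_get_num_from_state state → Spec_get_num_from_state state (get_num_from_state state)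

-- ===== LEMMAS AND PROOFS =====

-- pulling an accumulator out of the binary fold
theorem binfold_shift {α : Type} (g : α → Int) (l : List α) (n : Int) :
    l.foldl (fun a x => 2 * a + g x) n
      = n * 2 ^ l.length + l.foldl (fun a x => 2 * a + g x) 0 := by
  induction l generalizing n with
  | nil => simp
  | cons x t ih =>
    simp only [List.foldl_cons, List.length_cons]
    rw [ih (2 * n + g x), ih (2 * 0 + g x)]
    ring


-- str(int(b)) on a bool is the single character '1' / '0'
theorem toChars_bit (b : Bool) :
    PySem.Int.toChars (if b then (1:Int) else 0) = [if b then '1' else '0'] := by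
  cases b <;> decide

-- the character test the parse applies to a bit character
theorem bitchar (b : Bool) :
    (if (if b then '1' else '0') = '1' then (1:Int) else 0) = if b then 1 else 0 := by
  cases b <;> decide

theorem pyIntBase2?_getD (cs : List Char) (h : cs ≠ []) :
    (pyIntBase2? cs).getD 0 = cs.foldl (fun n c => 2 * n + (if c = '1' then 1 else 0)) 0 := by
  cases cs with
  | nil => exact absurd rfl h
  | cons c t => rfl

-- ===== VERDICT (by name: the statement is the Claim_ definition above) =====
theorem get_num_from_state_spec : Claim_equal_get_num_from_state := by
  intro state _ hpre
  obtain ⟨hne, hhd, hrows⟩ := hpre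
  obtain ⟨r0, rest, rfl⟩ : ∃ r0 rest, state = r0 :: rest := by
    cases state with
    | nil => exact absurd rfl hne
    | cons a t => exact ⟨a, t, rfl⟩
  unfold Spec_get_num_from_state get_num_from_state get_num_from_state_alt
  simp only [PySem.List.pyGetD_ofNat', List.getD_cons_zero]
  rw [PySem.List.foldl_pyRange_pyGetD (r0::rest) []
    (fun acc row => List.foldl (fun acc2 grid_col =>
        acc2 ++ PySem.Int.toChars (if PySem.List.pyGetD row grid_col false then 1 else 0)) acc
      (PySem.List.pyRange 0 (PySem.List.len r0))) [] (le_refl 0)]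
  simp only [Int.toNat_zero, List.drop_zero, toChars_bit, PySem.List.foldl_append_singleton_eq_map,
    PySem.List.foldl_append_eq_flatMap, List.nil_append, PySem.List.len_eq,
    PySem.List.pyRange_zero_natCast, List.foldl_map, PySem.List.pyGetD_natCast,
    Int.toNat_natCast]
  have hr0 : r0 ≠ [] := by simpa using hhd
  rw [pyIntBase2?_getD]
  · rw [List.foldl_flatMap]
    refine PySem.List.foldl_congr_mem _ _ _ _ ?_
    intro acc row hrow
    rw [List.foldl_map]
    simp only [bitchar]
    rw [binfold_shift (fun j => if row.getD j false then (1:Int) else 0)]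
    simp [List.length_range]
  · simp [List.flatMap_cons, hr0]
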